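-- pv_equiv track=rewrite | github.com/alexandrwrks/productivity | main.py | extremal_days
-- ===== SOURCE A (Python) =====
-- def extremal_days(array, find_min=True):
--     first_day = list(array.keys())[0]
--     extreme_score = array[first_day]
--     extreme_days = [first_day]
--
--     for day, score in array.items():
--         if (find_min and score < extreme_score) or (not find_min and score > extreme_score):
--             extreme_score = score
--             extreme_days = [day]
--         elif score == extreme_score and day != first_day:
--             extreme_days.append(day)
--
--     if len(extreme_days) >= 1:
--         days = ", ".join(extreme_days)
--     else:
--         days = extreme_days[0]
--     return days, extreme_score
-- ===== SOURCE B (Python) =====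
-- def extremal_days(array, find_min=True):
--     values = array.values()
--     extreme_score = min(values) if find_min else max(values)
--     days = ", ".join(day for day, score in array.items() if score == extreme_score)
--     return days, extreme_score
-- ===== Notes on version B (the rewrite author's own statement) =====
-- stated objective: simpler
-- what changed: Replaces A's single fused loop that maintains a running extreme plus a candidate day list (with reset/append cases and a first-day guard) by two passes: compute the extreme with builtin min/max over the values, then join the matching days in one filter pass.
import Mathlib
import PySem

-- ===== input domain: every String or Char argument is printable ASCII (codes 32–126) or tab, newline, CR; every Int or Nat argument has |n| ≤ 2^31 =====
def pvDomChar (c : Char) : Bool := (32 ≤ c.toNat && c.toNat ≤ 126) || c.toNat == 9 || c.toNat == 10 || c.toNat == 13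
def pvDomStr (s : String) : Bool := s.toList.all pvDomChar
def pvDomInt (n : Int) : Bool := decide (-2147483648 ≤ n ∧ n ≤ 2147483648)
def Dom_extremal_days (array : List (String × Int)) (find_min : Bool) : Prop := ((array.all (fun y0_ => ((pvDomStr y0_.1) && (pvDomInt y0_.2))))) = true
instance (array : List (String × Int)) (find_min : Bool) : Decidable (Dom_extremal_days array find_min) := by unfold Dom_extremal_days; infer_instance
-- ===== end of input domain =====

-- B replaces A's fused running-extreme loop by builtin min/max over the values plus one
-- filter pass for the matching days (objective: simpler).

-- ===== PORT A =====
def extremal_days (array : List (String × Int)) (find_min : Bool) : String × Int :=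
  let first_day := PySem.List.pyGetD (array.map Prod.fst) 0 ""
  let extreme_score := (PySem.Dict.mk array).getD first_day 0
  let res := array.foldl (fun st p =>
      if (find_min && decide (p.2 < st.1)) || (!find_min && decide (p.2 > st.1)) then
        (p.2, [p.1])
      else if p.2 == st.1 && p.1 != first_day then
        (st.1, st.2 ++ [p.1])
      else st)
    (extreme_score, [first_day])
  let days := if res.2.length ≥ 1 then PySem.Str.join ", " res.2
              else PySem.List.pyGetD res.2 0 ""
  (days, res.1)

-- ===== PORT B =====
def extremal_days_alt (array : List (String × Int)) (find_min : Bool) : String × Int :=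
  let values := array.map Prod.snd
  let extreme_score :=
    (if find_min then PySem.List.min? values (fun v => v)
     else PySem.List.max? values (fun v => v)).getD 0
  let days := PySem.Str.join ", "
    ((array.filter (fun p => p.2 == extreme_score)).map Prod.fst)
  (days, extreme_score)

-- ===== PRECONDITION & SPEC =====
-- Pre_ excludes the empty dict, on which A raises IndexError (and B raises ValueError), and
-- association lists with duplicate keys, which do not denote a Python dict (a dict's keys are
-- unique), so on them the list's item sequence is not what A iterates over.
def Pre_extremal_days (array : List (String × Int)) (find_min : Bool) : Prop :=
  array ≠ [] ∧ (array.map Prod.fst).Nodup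
instance (array : List (String × Int)) (find_min : Bool) : Decidable (Pre_extremal_days array find_min) := by unfold Pre_extremal_days; infer_instance

def pvWitness_extremal_days : (List (String × Int)) × Bool := ([("mon", 3), ("tue", 1), ("wed", 1)], true)

def Spec_extremal_days (array : List (String × Int)) (find_min : Bool) (out : String × Int) : Prop := out = extremal_days_alt array find_min
instance (array : List (String × Int)) (find_min : Bool) (out : String × Int) : Decidable (Spec_extremal_days array find_min out) := by unfold Spec_extremal_days; infer_instance

-- ===== CLAIM (what is proved, stated in full; the proofs are below) =====
def Claim_equal_extremal_days : Prop := ∀ (array : List (String × Int)) (find_min : Bool), Dom_extremal_days array find_min → Pre_extremal_days array find_min → Spec_extremal_days array find_min (extremal_days array find_min)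

-- ===== LEMMAS AND PROOFS =====

-- A's loop body, with the find_min branching resolved to a strict comparison bt.
def pvStep (bt : Int → Int → Bool) (first : String) (st : Int × List String) (p : String × Int) : Int × List String :=
  if bt p.2 st.1 then (p.2, [p.1])
  else if p.2 == st.1 && p.1 != first then (st.1, st.2 ++ [p.1])
  else st

-- the running extreme of A's loop
def pvE (bt : Int → Int → Bool) (s : Int) (tl : List (String × Int)) : Int :=
  tl.foldl (fun a p => if bt p.2 a then p.2 else a) s

lemma pvE_cases (bt : Int → Int → Bool)
    (htrans : ∀ a b c, bt a b = true → bt b c = true → bt a c = true) :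
    ∀ (tl : List (String × Int)) (s : Int), pvE bt s tl = s ∨ bt (pvE bt s tl) s = true := by
  intro tl
  induction tl with
  | nil => intro s; left; rfl
  | cons p rest ih =>
    intro s
    simp only [pvE, List.foldl_cons]
    by_cases h : bt p.2 s = true
    · simp only [h, if_pos]
      rcases ih p.2 with h1 | h1
      · right; rw [pvE] at h1; rw [h1]; exact h
      · right; exact htrans _ _ _ h1 h
    · rw [if_neg h]
      exact ih s

lemma pvLoop (bt : Int → Int → Bool)
    (hirr : ∀ a, bt a a = false)
    (htot : ∀ a b, bt a b = false → a ≠ b → bt b a = true)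
    (htrans : ∀ a b c, bt a b = true → bt b c = true → bt a c = true) :
    ∀ (tl : List (String × Int)) (s : Int) (ds : List String) (first : String),
      (∀ p ∈ tl, p.1 ≠ first) →
      tl.foldl (pvStep bt first) (s, ds) =
        (pvE bt s tl,
         if pvE bt s tl = s then ds ++ (tl.filter (fun p => p.2 == s)).map Prod.fst
         else (tl.filter (fun p => p.2 == pvE bt s tl)).map Prod.fst) := by
  intro tl
  induction tl with
  | nil => intro s ds first _; simp [pvE]
  | cons p rest ih =>
    intro s ds first hf
    have hp : p.1 ≠ first := hf p (List.mem_cons_self ..)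
    have hfr : ∀ q ∈ rest, q.1 ≠ first := fun q hq => hf q (List.mem_cons_of_mem _ hq)
    have hEdef : pvE bt s (p :: rest) = pvE bt (if bt p.2 s then p.2 else s) rest := by
      simp [pvE]
    by_cases hb : bt p.2 s = true
    · -- strict improvement: reset
      have hne : p.2 ≠ s := by
        intro h; rw [h] at hb; rw [hirr] at hb; exact Bool.false_ne_true hb
      have hstep : pvStep bt first (s, ds) p = (p.2, [p.1]) := by
        simp [pvStep, hb]
      rw [List.foldl_cons, hstep, ih p.2 [p.1] first hfr]
      have hE : pvE bt s (p :: rest) = pvE bt p.2 rest := by rw [hEdef, if_pos hb]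
      have hEne : pvE bt s (p :: rest) ≠ s := by
        rcases pvE_cases bt htrans rest p.2 with h1 | h1
        · rw [hE, h1]; exact hne
        · rw [hE]; intro hcontr
          have := htrans _ _ _ h1 hb
          rw [hcontr] at this; rw [hirr] at this; exact Bool.false_ne_true this
      rw [hE] at hEne ⊢
      by_cases hEe : pvE bt p.2 rest = p.2
      · rw [if_pos hEe, if_neg hEne]
        simp [hEe]
      · rw [if_neg hEe, if_neg hEne]
        have : (p.2 == pvE bt p.2 rest) = false := by
          simp only [beq_eq_false_iff_ne, ne_eq]
          intro h; exact hEe h.symm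
        simp [this]
    · -- no improvement
      have hb' : bt p.2 s = false := by
        cases h : bt p.2 s with
        | false => rfl
        | true => exact absurd h hb
      have hE : pvE bt s (p :: rest) = pvE bt s rest := by rw [hEdef, if_neg hb]
      by_cases he : p.2 = s
      · -- tie: append (the first-day guard is true on tl)
        have hstep : pvStep bt first (s, ds) p = (s, ds ++ [p.1]) := by
          simp [pvStep, he, hp, hirr]
        rw [List.foldl_cons, hstep, ih s (ds ++ [p.1]) first hfr, hE]
        by_cases hEe : pvE bt s rest = s
        · rw [if_pos hEe, if_pos hEe]
          simp [he]
        · rw [if_neg hEe, if_neg hEe]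
          have : (p.2 == pvE bt s rest) = false := by
            simp only [beq_eq_false_iff_ne, ne_eq]
            intro h; rw [he] at h; exact hEe h.symm
          simp [this]
      · -- strictly worse: skip
        have hstep : pvStep bt first (s, ds) p = (s, ds) := by
          simp [pvStep, hb, he]
        rw [List.foldl_cons, hstep, ih s ds first hfr, hE]
        have hso : bt s p.2 = true := htot _ _ hb' he
        by_cases hEe : pvE bt s rest = s
        · rw [if_pos hEe, if_pos hEe]
          simp [he]
        · rw [if_neg hEe, if_neg hEe]
          have : (p.2 == pvE bt s rest) = false := by
            simp only [beq_eq_false_iff_ne, ne_eq]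
            intro h
            rcases pvE_cases bt htrans rest s with h1 | h1
            · exact hEe h1
            · have := htrans _ _ _ h1 hso
              rw [← h] at this; rw [hirr] at this; exact Bool.false_ne_true this
          simp [this]

-- the "if len >= 1" at the end of A is the join in both branches
lemma pvJoinIf (ds : List String) :
    (if ds.length ≥ 1 then PySem.Str.join ", " ds else PySem.List.pyGetD ds 0 "") =
      PySem.Str.join ", " ds := by
  cases ds with
  | nil => decide
  | cons h t => simp

lemma pvMinStep : (fun (a : Int) (p : String × Int) => if decide (p.2 < a) = true then p.2 else a) =
    (fun (a : Int) (p : String × Int) => min a p.2) := by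
  funext a p
  simp only [decide_eq_true_eq]
  rw [min_def]
  split_ifs <;> omega

lemma pvMaxStep : (fun (a : Int) (p : String × Int) => if decide (a < p.2) = true then p.2 else a) =
    (fun (a : Int) (p : String × Int) => max a p.2) := by
  funext a p
  simp only [decide_eq_true_eq]
  rw [max_def]
  split_ifs <;> omega

-- ===== VERDICT (by name: the statement is the Claim_ definition above) =====
theorem extremal_days_spec : Claim_equal_extremal_days := by
  intro array find_min _ hpre
  obtain ⟨hne, hnodup⟩ := hpre
  unfold Spec_extremal_days
  cases array with
  | nil => exact absurd rfl hne
  | cons hd tl =>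
    obtain ⟨d0, v0⟩ := hd
    have hnod : ∀ p ∈ tl, p.1 ≠ d0 := by
      intro p hp
      simp only [List.map_cons, List.nodup_cons, List.mem_map] at hnodup
      intro h
      exact hnodup.1 ⟨p, hp, h⟩
    -- pick bt according to find_min
    have key : ∀ bt : Int → Int → Bool,
        (∀ a, bt a a = false) →
        (∀ a b, bt a b = false → a ≠ b → bt b a = true) →
        (∀ a b c, bt a b = true → bt b c = true → bt a c = true) →
        ((d0, v0) :: tl).foldl (pvStep bt d0) (v0, [d0]) =
          (pvE bt v0 tl,
           (((d0, v0) :: tl).filter (fun p => p.2 == pvE bt v0 tl)).map Prod.fst) := by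
      intro bt hirr htot htrans
      have hstep0 : pvStep bt d0 (v0, [d0]) (d0, v0) = (v0, [d0]) := by
        simp [pvStep, hirr]
      rw [List.foldl_cons, hstep0, pvLoop bt hirr htot htrans tl v0 [d0] d0 hnod]
      by_cases hEe : pvE bt v0 tl = v0
      · rw [if_pos hEe]
        simp [hEe]
      · rw [if_neg hEe]
        have : (v0 == pvE bt v0 tl) = false := by
          simp only [beq_eq_false_iff_ne, ne_eq]
          intro h; exact hEe h.symm
        simp [this]
    cases find_min with
    | true =>
      have hbt := key (fun a b => decide (a < b)) (by simp)
        (by intro a b h1 h2; simp at *; omega)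
        (by intro a b c h1 h2; simp at *; omega)
      show extremal_days ((d0, v0) :: tl) true = extremal_days_alt ((d0, v0) :: tl) true
      unfold extremal_days extremal_days_alt
      simp only [List.map_cons, PySem.List.pyGetD_zero_cons, PySem.Dict.getD,
        PySem.Dict.get?_mk_cons, BEq.rfl, if_pos, Option.getD_some, Bool.true_and,
        Bool.false_and, Bool.or_false, Bool.not_true]
      have hfun : (fun (st : Int × List String) (p : String × Int) =>
          if decide (p.2 < st.1) = true then (p.2, [p.1])
          else if (p.2 == st.1 && p.1 != d0) = true then (st.1, st.2 ++ [p.1]) else st)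
          = pvStep (fun a b => decide (a < b)) d0 := by
        funext st p; simp [pvStep]
      rw [hfun, hbt, pvJoinIf]
      have hmin : (PySem.List.min? (v0 :: tl.map Prod.snd) (fun v => v)).getD 0 =
          pvE (fun a b => decide (a < b)) v0 tl := by
        simp only [PySem.List.min?_id_cons, Option.getD_some, pvE, List.foldl_map]
        rw [pvMinStep]
      rw [hmin]
    | false =>
      have hbt := key (fun a b => decide (b < a)) (by simp)
        (by intro a b h1 h2; simp at *; omega)
        (by intro a b c h1 h2; simp at *; omega)
      show extremal_days ((d0, v0) :: tl) false = extremal_days_alt ((d0, v0) :: tl) false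
      unfold extremal_days extremal_days_alt
      simp only [List.map_cons, PySem.List.pyGetD_zero_cons, PySem.Dict.getD,
        PySem.Dict.get?_mk_cons, BEq.rfl, if_pos, Option.getD_some, Bool.true_and,
        Bool.false_and, Bool.false_or, Bool.not_false, gt_iff_lt]
      have hfun : (fun (st : Int × List String) (p : String × Int) =>
          if decide (st.1 < p.2) = true then (p.2, [p.1])
          else if (p.2 == st.1 && p.1 != d0) = true then (st.1, st.2 ++ [p.1]) else st)
          = pvStep (fun a b => decide (b < a)) d0 := by
        funext st p; simp [pvStep]
      rw [hfun, hbt, pvJoinIf]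
      have hmax : (PySem.List.max? (v0 :: tl.map Prod.snd) (fun v => v)).getD 0 =
          pvE (fun a b => decide (b < a)) v0 tl := by
        simp only [PySem.List.max?_id_cons, Option.getD_some, pvE, List.foldl_map]
        rw [pvMaxStep]
      rw [if_neg Bool.false_ne_true, hmax]
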